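-- pv_equiv track=rewrite | github.com/alekseimi/TRIRProject | rest_client.py | parse_frequencies
-- ===== SOURCE A (Python) =====
-- def parse_frequencies(data):
--     weeks_list = []
--     additions_number_list = []
--     deletions_number_list = []
--
--     for week in data[-52:]:
--         weeks_list.append(week[0])
--         additions_number_list.append(week[1])
--         deletions_number_list.append(abs(week[2]))
--
--     frequencies_list = [weeks_list,
--                         additions_number_list,
--                         deletions_number_list]
--     return frequencies_list
-- ===== SOURCE B (Python) =====
-- def parse_frequencies(data):
--     # Walk the data back-to-front, collecting at most 52 rows into the three
--     # columns, then reverse each column once at the end.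
--     weeks, additions, deletions = [], [], []
--     count = 0
--     for week in reversed(data):
--         if count == 52:
--             break
--         weeks.append(week[0])
--         additions.append(week[1])
--         deletions.append(abs(week[2]))
--         count += 1
--     return [weeks[::-1], additions[::-1], deletions[::-1]]
-- ===== Notes on version B (the rewrite author's own statement) =====
-- stated objective: alternative
-- what changed: Instead of slicing off the last 52 rows and appending forward, B scans the list back-to-front with a counter that stops after 52 rows, collects the columns in reverse, and reverses each column once at the end (no slice is ever taken).
import Mathlib
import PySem

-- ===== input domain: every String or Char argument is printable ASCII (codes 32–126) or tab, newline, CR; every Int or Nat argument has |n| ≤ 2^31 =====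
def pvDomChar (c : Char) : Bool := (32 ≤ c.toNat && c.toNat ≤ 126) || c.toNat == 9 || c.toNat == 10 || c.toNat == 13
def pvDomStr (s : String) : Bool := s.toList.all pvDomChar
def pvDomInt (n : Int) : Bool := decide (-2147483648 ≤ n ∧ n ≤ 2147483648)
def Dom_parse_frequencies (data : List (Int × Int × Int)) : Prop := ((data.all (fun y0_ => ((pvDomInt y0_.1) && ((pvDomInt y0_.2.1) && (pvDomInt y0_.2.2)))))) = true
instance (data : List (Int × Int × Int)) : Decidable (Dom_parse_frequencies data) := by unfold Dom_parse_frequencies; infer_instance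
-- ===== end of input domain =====

-- B replaces A's forward pass over data[-52:] by a back-to-front scan capped at 52
-- rows with a final per-column reversal (objective: alternative, no slice taken).

-- ===== PORT A =====
-- literal port of A: one pass over data[-52:] appending into three accumulator lists
def parse_frequencies (data : List (Int × Int × Int)) : List (List Int) :=
  let st := (PySem.List.slice data (some (-52)) none).foldl
    (fun (acc : List Int × List Int × List Int) week =>
      (acc.1 ++ [week.1], acc.2.1 ++ [week.2.1], acc.2.2 ++ [|week.2.2|]))
    ([], [], [])
  [st.1, st.2.1, st.2.2]

-- ===== PORT B =====
-- the 'for week in reversed(data)' loop with its break-at-52 counter, appending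
-- into the three accumulators exactly as Source B does
def pfb_go : List (Int × Int × Int) → Nat → List Int → List Int → List Int →
    (List Int × List Int × List Int)
  | [], _, w, a, d => (w, a, d)
  | x :: t, count, w, a, d =>
    if count = 52 then (w, a, d)
    else pfb_go t (count + 1) (w ++ [x.1]) (a ++ [x.2.1]) (d ++ [|x.2.2|])

-- port of B: reversed(data) scan, then each column's [::-1] (= List.reverse)
def parse_frequencies_alt (data : List (Int × Int × Int)) : List (List Int) :=
  let st := pfb_go data.reverse 0 [] [] []
  [st.1.reverse, st.2.1.reverse, st.2.2.reverse]

-- ===== PRECONDITION & SPEC =====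
def Spec_parse_frequencies (data : List (Int × Int × Int)) (out : List (List Int)) : Prop := out = parse_frequencies_alt data
instance (data : List (Int × Int × Int)) (out : List (List Int)) : Decidable (Spec_parse_frequencies data out) := by unfold Spec_parse_frequencies; infer_instance

-- ===== CLAIM (what is proved, stated in full; the proofs are below) =====
def Claim_equal_parse_frequencies : Prop := ∀ (data : List (Int × Int × Int)), Dom_parse_frequencies data → Spec_parse_frequencies data (parse_frequencies data)

-- ===== LEMMAS AND PROOFS =====
-- invariant of A's loop: the fold appends the three column maps to the accumulators
theorem pf_fold (l : List (Int × Int × Int)) (a b c : List Int) :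
    l.foldl (fun (acc : List Int × List Int × List Int) week =>
      (acc.1 ++ [week.1], acc.2.1 ++ [week.2.1], acc.2.2 ++ [|week.2.2|])) (a, b, c)
    = (a ++ l.map (·.1), b ++ l.map (·.2.1), c ++ l.map (fun x => |x.2.2|)) := by
  induction l generalizing a b c with
  | nil => simp
  | cons h t ih => simp [List.foldl, ih]

-- invariant of B's loop: it appends the column maps of the first 52 - count rows
theorem pfb_go_eq (l : List (Int × Int × Int)) (count : Nat) (hc : count ≤ 52)
    (w a d : List Int) :
    pfb_go l count w a d
    = (w ++ (l.take (52 - count)).map (·.1),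
       a ++ (l.take (52 - count)).map (·.2.1),
       d ++ (l.take (52 - count)).map (fun x => |x.2.2|)) := by
  induction l generalizing count w a d with
  | nil => simp [pfb_go]
  | cons x t ih =>
    by_cases h : count = 52
    · subst h; simp [pfb_go]
    · have hlt : count < 52 := lt_of_le_of_ne hc h
      have hs : 52 - count = (52 - (count + 1)) + 1 := by omega
      rw [pfb_go, if_neg h, ih (count + 1) (by omega), hs]
      simp [List.take_succ_cons]

theorem parse_frequencies_spec : Claim_equal_parse_frequencies := by
  intro data _
  unfold Spec_parse_frequencies parse_frequencies parse_frequencies_alt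
  rw [PySem.List.slice_from_neg_ofNat data 52 (by omega)]
  rw [pfb_go_eq data.reverse 0 (by omega), pf_fold]
  simp [List.take_reverse]
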